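-- pv_equiv track=rewrite | github.com/jxliao6/ConceptGuide_code | MyResearchCode/other_modules/ExtractWordsFromVideos.py | CreateVocAppearDict
-- ===== SOURCE A (Python) =====
-- def CreateVocAppearDict(voc_list,word_freq_dict):
--     voc_appear_dict = {}
--     for word,count in voc_list:
--         l = []
--         for vid in word_freq_dict:
--             if word in [x[0] for x in word_freq_dict[vid]]:
--                 l.append(vid)
--         voc_appear_dict[word] = l
--     return voc_appear_dict
-- ===== SOURCE B (Python) =====
-- def CreateVocAppearDict(voc_list, word_freq_dict):
--     # Build an inverted index word -> [videos containing it] in a single pass,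
--     # then answer each vocab word by one dictionary lookup.
--     index = {}
--     for vid, lst in word_freq_dict.items():
--         seen = set()
--         for w, _ in lst:
--             if w not in seen:
--                 seen.add(w)
--                 index.setdefault(w, []).append(vid)
--     return {word: index.get(word, []) for word, _ in voc_list}
-- ===== Notes on version B (the rewrite author's own statement) =====
-- stated objective: faster
-- what changed: Instead of scanning every video's word list for every vocab word, B builds an inverted index (word -> videos, deduplicated per video with a seen-set) in one pass over word_freq_dict and answers each vocab word by a single dictionary lookup.
import Mathlib
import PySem

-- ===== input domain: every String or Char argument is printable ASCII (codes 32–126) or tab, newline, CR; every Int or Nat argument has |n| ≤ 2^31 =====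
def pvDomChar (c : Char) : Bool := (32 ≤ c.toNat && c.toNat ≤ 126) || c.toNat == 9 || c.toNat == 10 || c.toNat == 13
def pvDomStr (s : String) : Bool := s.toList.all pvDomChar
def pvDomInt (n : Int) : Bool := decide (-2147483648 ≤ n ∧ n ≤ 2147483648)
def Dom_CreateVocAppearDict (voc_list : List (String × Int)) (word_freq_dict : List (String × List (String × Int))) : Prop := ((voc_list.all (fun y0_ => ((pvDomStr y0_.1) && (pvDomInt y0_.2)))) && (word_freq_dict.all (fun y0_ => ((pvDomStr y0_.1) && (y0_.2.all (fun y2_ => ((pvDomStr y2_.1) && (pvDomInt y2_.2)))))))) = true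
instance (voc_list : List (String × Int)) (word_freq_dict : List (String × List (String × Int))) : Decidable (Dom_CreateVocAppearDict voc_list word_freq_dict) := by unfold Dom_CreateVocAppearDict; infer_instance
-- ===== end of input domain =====

-- B replaces A's per-vocab-word scan of every video's word list by an inverted index
-- (word -> videos) built in one pass, then one lookup per vocab word (objective: faster).
-- The dict parameter word_freq_dict is embedded via PySem.Dict.ofList (Python dict semantics)
-- in both ports.

-- ===== PORT A =====
def CreateVocAppearDict (voc_list : List (String × Int)) (word_freq_dict : List (String × List (String × Int))) : List (String × List String) :=
  -- voc_appear_dict = {}; for word,count in voc_list: l = []; for vid in word_freq_dict: if word in [x[0] for x in word_freq_dict[vid]]: l.append(vid); voc_appear_dict[word] = l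
  -- (d.getD p.1 [] is exact: every iterated vid is a key of d, so the KeyError branch is unreachable)
  (voc_list.foldl
    (fun acc wc =>
      acc.insert wc.1
        ((PySem.Dict.ofList word_freq_dict).items.foldl
          (fun l p => if wc.1 ∈ ((PySem.Dict.ofList word_freq_dict).getD p.1 []).map Prod.fst then l ++ [p.1] else l)
          []))
    PySem.Dict.empty).items

-- ===== PORT B =====
-- one video's contribution to the inverted index: first occurrence of each word appends vid
def pvIndexStep (idx : PySem.Dict String (List String)) (p : String × List (String × Int)) : PySem.Dict String (List String) :=
  (p.2.foldl
    (fun st q =>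
      if PySem.Set.contains st.2 q.1 then st
      else (st.1.modify q.1 [] (· ++ [p.1]), PySem.Set.add st.2 q.1))
    (idx, PySem.Set.empty)).1

def CreateVocAppearDict_alt (voc_list : List (String × Int)) (word_freq_dict : List (String × List (String × Int))) : List (String × List String) :=
  (voc_list.foldl
    (fun acc wc =>
      acc.insert wc.1
        (((PySem.Dict.ofList word_freq_dict).items.foldl pvIndexStep PySem.Dict.empty).getD wc.1 []))
    PySem.Dict.empty).items

-- ===== PRECONDITION & SPEC =====
def Spec_CreateVocAppearDict (voc_list : List (String × Int)) (word_freq_dict : List (String × List (String × Int))) (out : List (String × List String)) : Prop := out = CreateVocAppearDict_alt voc_list word_freq_dict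
instance (voc_list : List (String × Int)) (word_freq_dict : List (String × List (String × Int))) (out : List (String × List String)) : Decidable (Spec_CreateVocAppearDict voc_list word_freq_dict out) := by unfold Spec_CreateVocAppearDict; infer_instance

-- ===== CLAIM (what is proved, stated in full; the proofs are below) =====
def Claim_equal_CreateVocAppearDict : Prop := ∀ (voc_list : List (String × Int)) (word_freq_dict : List (String × List (String × Int))), Dom_CreateVocAppearDict voc_list word_freq_dict → Spec_CreateVocAppearDict voc_list word_freq_dict (CreateVocAppearDict voc_list word_freq_dict)

-- ===== LEMMAS AND PROOFS =====

-- the inner seen-set fold of pvIndexStep, read at one word w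
lemma pvInner_getD (vid : String) (lst : List (String × Int)) (w : String) :
    ∀ (idx : PySem.Dict String (List String)) (seen : PySem.Set String),
      ((lst.foldl
        (fun st q =>
          if PySem.Set.contains st.2 q.1 then st
          else (st.1.modify q.1 [] (· ++ [vid]), PySem.Set.add st.2 q.1))
        (idx, seen)).1).getD w []
      = if w ∈ lst.map Prod.fst ∧ w ∉ seen then idx.getD w [] ++ [vid] else idx.getD w [] := by
  induction lst with
  | nil => intro idx seen; simp
  | cons q rest ih =>
    intro idx seen
    rw [List.foldl_cons]
    by_cases hq : PySem.Set.contains seen q.1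
    · have hqmem : q.1 ∈ seen := (PySem.Set.contains_iff seen q.1).mp hq
      rw [if_pos hq, ih]
      by_cases hw : w = q.1
      · subst hw; simp [hqmem]
      · simp only [List.map_cons, List.mem_cons, hw, false_or]
    · have hqn : q.1 ∉ seen := fun h => hq ((PySem.Set.contains_iff seen q.1).mpr h)
      rw [if_neg hq, ih]
      by_cases hw : w = q.1
      · subst hw
        rw [PySem.Dict.getD_modify]
        simp [hqn]  -- w = q.1 branch: w is now in seen, getD picks up the appended vid
      · rw [PySem.Dict.getD_modify]
        have hmem : (w ∈ PySem.Set.add seen q.1) ↔ w ∈ seen := by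
          rw [PySem.Set.mem_add]; simp [hw]
        simp only [hw, if_false, List.map_cons, List.mem_cons, false_or, hmem]

-- one pvIndexStep, read at one word w
lemma pvIndexStep_getD (idx : PySem.Dict String (List String)) (p : String × List (String × Int)) (w : String) :
    (pvIndexStep idx p).getD w []
      = if w ∈ p.2.map Prod.fst then idx.getD w [] ++ [p.1] else idx.getD w [] := by
  unfold pvIndexStep
  rw [pvInner_getD p.1 p.2 w idx PySem.Set.empty]
  simp only [PySem.Set.empty, List.not_mem_nil, not_false_eq_true, and_true]

-- the whole inverted index, read at one word w: exactly the vids whose list contains w, in order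
lemma pvIndex_getD (items : List (String × List (String × Int))) (w : String) :
    ∀ (idx : PySem.Dict String (List String)),
      (items.foldl pvIndexStep idx).getD w []
        = idx.getD w [] ++ (items.filter (fun p => decide (w ∈ p.2.map Prod.fst))).map Prod.fst := by
  induction items with
  | nil => intro idx; simp
  | cons p rest ih =>
    intro idx
    simp only [List.foldl_cons, ih, pvIndexStep_getD]
    by_cases hw : w ∈ p.2.map Prod.fst
    · simp [hw]
    · simp [hw]

-- A's inner loop equals the same filter, because word_freq_dict[vid] = p.2 for p among the dict's items
lemma pvA_inner (d : PySem.Dict String (List (String × Int))) (hnd : d.keys.Nodup) (w : String) :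
    d.items.foldl
        (fun l p => if w ∈ (d.getD p.1 []).map Prod.fst then l ++ [p.1] else l) []
      = (d.items.filter (fun p => decide (w ∈ p.2.map Prod.fst))).map Prod.fst := by
  have hcongr :
      d.items.foldl
          (fun l p => if w ∈ (d.getD p.1 []).map Prod.fst then l ++ [p.1] else l) []
        = d.items.foldl
          (fun l p => if w ∈ p.2.map Prod.fst then l ++ [p.1] else l) [] := by
    apply PySem.List.foldl_congr_mem
    intro acc p hp
    have hp' : (p.1, p.2) ∈ d.items := by simpa using hp
    rw [PySem.Dict.getD_of_mem_items d hp' hnd]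
  rw [hcongr,
    PySem.List.foldl_append_ite (fun p => w ∈ p.2.map Prod.fst) Prod.fst d.items []]
  simp

-- ===== VERDICT (by name: the statement is the Claim_ definition above) =====
theorem CreateVocAppearDict_spec : Claim_equal_CreateVocAppearDict := by
  intro voc_list word_freq_dict _
  unfold Spec_CreateVocAppearDict CreateVocAppearDict CreateVocAppearDict_alt
  have hnd : (PySem.Dict.ofList word_freq_dict).keys.Nodup :=
    PySem.Dict.nodup_keys_ofList word_freq_dict
  congr 1
  apply PySem.List.foldl_congr_mem
  intro acc wc _
  rw [pvA_inner _ hnd wc.1, pvIndex_getD _ wc.1 PySem.Dict.empty]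
  simp [PySem.Dict.getD_empty]
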